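-- pv_equiv track=rewrite | github.com/niart120/spss_draw | spss_draw/transforms.py | transform_tiles
-- ===== SOURCE A (Python) =====
-- def transform_tiles(
--     size: int,
--     tiles: list[tuple[int, int, int]],
--     rotate: int = 0,
--     flip_h: bool = False,
--     flip_v: bool = False,
-- ) -> list[tuple[int, int, int]]:
--     """Apply rotation and/or flip to tile coordinates.
--
--     Transformations are applied in order: rotate → flip_h → flip_v.
--
--     Parameters
--     ----------
--     size:
--         Side length of the outer square (unchanged by transforms).
--     tiles:
--         List of ``(x, y, side)`` tuples with bottom-left origin.
--     rotate:
--         Clockwise rotation in degrees; must be 0, 90, 180, or 270.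
--     flip_h:
--         Mirror left-to-right (around the vertical centre axis).
--     flip_v:
--         Mirror top-to-bottom (around the horizontal centre axis).
--     """
--     result = list(tiles)
--
--     for _ in range((rotate // 90) % 4):
--         # 90° clockwise: (x, y, s) → (size-y-s, x, s)
--         result = [(size - y - s, x, s) for x, y, s in result]
--
--     if flip_h:
--         result = [(size - x - s, y, s) for x, y, s in result]
--
--     if flip_v:
--         result = [(x, size - y - s, s) for x, y, s in result]
--
--     return result
-- ===== SOURCE B (Python) =====
-- def transform_tiles(
--     size: int,
--     tiles: list[tuple[int, int, int]],
--     rotate: int = 0,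
--     flip_h: bool = False,
--     flip_v: bool = False,
-- ) -> list[tuple[int, int, int]]:
--     """Single pass: closed-form net rotation (r = (rotate//90) % 4) with the
--     flips folded into the per-tile coordinate formula."""
--     r = (rotate // 90) % 4
--     out = []
--     for x, y, s in tiles:
--         if r == 1:
--             x, y = size - y - s, x
--         elif r == 2:
--             x, y = size - x - s, size - y - s
--         elif r == 3:
--             x, y = y, size - x - s
--         if flip_h:
--             x = size - x - s
--         if flip_v:
--             y = size - y - s
--         out.append((x, y, s))
--     return out
-- ===== Notes on version B (the rewrite author's own statement) =====
-- stated objective: simpler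
-- what changed: Replaces the repeated 90-degree mapping loop plus two separate flip passes with one single pass that applies the closed-form net rotation r=(rotate//90)%4 and both flips per tile.
import Mathlib
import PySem

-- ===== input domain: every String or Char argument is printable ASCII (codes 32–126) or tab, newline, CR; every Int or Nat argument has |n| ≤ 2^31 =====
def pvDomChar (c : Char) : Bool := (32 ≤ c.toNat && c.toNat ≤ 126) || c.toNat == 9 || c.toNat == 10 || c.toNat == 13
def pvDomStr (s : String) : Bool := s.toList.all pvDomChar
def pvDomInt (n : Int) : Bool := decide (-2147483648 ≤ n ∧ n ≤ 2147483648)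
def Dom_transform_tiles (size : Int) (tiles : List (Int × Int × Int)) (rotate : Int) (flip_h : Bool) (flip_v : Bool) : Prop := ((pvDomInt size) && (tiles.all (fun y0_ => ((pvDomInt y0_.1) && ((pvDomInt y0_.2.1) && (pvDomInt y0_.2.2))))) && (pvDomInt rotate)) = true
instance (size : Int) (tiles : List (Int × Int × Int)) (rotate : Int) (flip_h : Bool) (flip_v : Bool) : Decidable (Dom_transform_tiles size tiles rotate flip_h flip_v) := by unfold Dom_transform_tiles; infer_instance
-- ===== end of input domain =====

-- B replaces A's repeated 90° mapping loop plus two flip passes by one single pass applying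
-- the closed-form net rotation r = (rotate//90)%4 with both flips folded in (objective: simpler).

-- ===== PORT A =====
def transform_tiles (size : Int) (tiles : List (Int × Int × Int)) (rotate : Int) (flip_h : Bool) (flip_v : Bool) : List (Int × Int × Int) :=
  let result := tiles
  let result := (PySem.List.pyRange 0 (PySem.Int.mod (PySem.Int.floordiv rotate 90) 4) 1).foldl
    (fun res _ => res.map (fun t => (size - t.2.1 - t.2.2, t.1, t.2.2))) result
  let result := if flip_h then result.map (fun t => (size - t.1 - t.2.2, t.2.1, t.2.2)) else result
  let result := if flip_v then result.map (fun t => (t.1, size - t.2.1 - t.2.2, t.2.2)) else result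
  result

-- ===== PORT B =====
def transform_tiles_alt (size : Int) (tiles : List (Int × Int × Int)) (rotate : Int) (flip_h : Bool) (flip_v : Bool) : List (Int × Int × Int) :=
  let r := PySem.Int.mod (PySem.Int.floordiv rotate 90) 4
  tiles.foldl (fun out t =>
    let x := t.1
    let y := t.2.1
    let s := t.2.2
    let p := if r = 1 then (size - y - s, x)
             else if r = 2 then (size - x - s, size - y - s)
             else if r = 3 then (y, size - x - s)
             else (x, y)
    let x' := if flip_h then size - p.1 - s else p.1
    let y' := if flip_v then size - p.2 - s else p.2
    out ++ [(x', y', s)]) []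

-- ===== PRECONDITION & SPEC =====
def Spec_transform_tiles (size : Int) (tiles : List (Int × Int × Int)) (rotate : Int) (flip_h : Bool) (flip_v : Bool) (out : List (Int × Int × Int)) : Prop := out = transform_tiles_alt size tiles rotate flip_h flip_v
instance (size : Int) (tiles : List (Int × Int × Int)) (rotate : Int) (flip_h : Bool) (flip_v : Bool) (out : List (Int × Int × Int)) : Decidable (Spec_transform_tiles size tiles rotate flip_h flip_v out) := by unfold Spec_transform_tiles; infer_instance

-- ===== CLAIM (what is proved, stated in full; the proofs are below) =====
def Claim_equal_transform_tiles : Prop := ∀ (size : Int) (tiles : List (Int × Int × Int)) (rotate : Int) (flip_h : Bool) (flip_v : Bool), Dom_transform_tiles size tiles rotate flip_h flip_v → Spec_transform_tiles size tiles rotate flip_h flip_v (transform_tiles size tiles rotate flip_h flip_v)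

-- ===== LEMMAS AND PROOFS =====

-- B's accumulating fold is a map
theorem alt_foldl_snoc {α β : Type} (f : α → β) (l : List α) (acc : List β) :
    l.foldl (fun out t => out ++ [f t]) acc = acc ++ l.map f := by
  induction l generalizing acc with
  | nil => simp
  | cons a t ih => simp [List.foldl, ih]

theorem transform_tiles_eq_alt (size : Int) (tiles : List (Int × Int × Int)) (rotate : Int) (flip_h : Bool) (flip_v : Bool) :
    transform_tiles size tiles rotate flip_h flip_v = transform_tiles_alt size tiles rotate flip_h flip_v := by
  have hr0 : 0 ≤ PySem.Int.mod (PySem.Int.floordiv rotate 90) 4 :=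
    PySem.Int.mod_nonneg _ (by norm_num)
  have hr4 : PySem.Int.mod (PySem.Int.floordiv rotate 90) 4 < 4 :=
    PySem.Int.mod_lt _ (by norm_num)
  unfold transform_tiles transform_tiles_alt
  set r := PySem.Int.mod (PySem.Int.floordiv rotate 90) 4 with hrdef
  clear_value r
  clear hrdef
  rw [alt_foldl_snoc]
  interval_cases r
  all_goals first
    | rw [show PySem.List.pyRange 0 0 1 = ([] : List Int) by decide]
    | rw [show PySem.List.pyRange 0 1 1 = ([0] : List Int) by decide]
    | rw [show PySem.List.pyRange 0 2 1 = ([0, 1] : List Int) by decide]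
    | rw [show PySem.List.pyRange 0 3 1 = ([0, 1, 2] : List Int) by decide]
  all_goals cases flip_h <;> cases flip_v
  all_goals
    induction tiles with
    | nil => simp
    | cons a t ih =>
      obtain ⟨x, y, s⟩ := a
      simp_all [List.foldl]
      try omega
      try exact ⟨by ring, ih⟩

theorem transform_tiles_spec : Claim_equal_transform_tiles := by
  intro size tiles rotate flip_h flip_v _
  exact transform_tiles_eq_alt size tiles rotate flip_h flip_v
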